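-- pv_equiv track=rewrite | github.com/steve-thousand/advent_of_code_2020 | 23/solution.py | can_accept_amphipod
-- ===== SOURCE A (Python) =====
-- def can_accept_amphipod(room, type):
--     for i, space in enumerate(room):
--         if space == ".":
--             continue
--         else:
--             for j in range(i, len(room)):
--                 if room[j] != type:
--                     return False
--     return True
-- ===== SOURCE B (Python) =====
-- def can_accept_amphipod(room, type):
--     started = False
--     for space in room:
--         if space != ".":
--             started = True
--         if started and space != type:
--             return False
--     return True
-- ===== Notes on version B (the rewrite author's own statement) =====
-- stated objective: simpler
-- what changed: Replaces A's nested re-scan of the room suffix from every occupied index with a single linear pass maintaining a 'started' flag.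
import Mathlib
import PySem

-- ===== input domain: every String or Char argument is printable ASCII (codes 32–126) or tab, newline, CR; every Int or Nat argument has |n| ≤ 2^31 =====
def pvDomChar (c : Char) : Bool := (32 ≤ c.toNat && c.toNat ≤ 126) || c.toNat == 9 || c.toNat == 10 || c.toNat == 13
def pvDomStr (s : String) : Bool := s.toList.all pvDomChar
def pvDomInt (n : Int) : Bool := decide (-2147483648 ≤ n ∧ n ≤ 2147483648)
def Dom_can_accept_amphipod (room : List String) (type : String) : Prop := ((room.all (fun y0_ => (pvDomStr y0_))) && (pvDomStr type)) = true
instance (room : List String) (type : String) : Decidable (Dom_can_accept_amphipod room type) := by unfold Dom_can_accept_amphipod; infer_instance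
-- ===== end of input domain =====

-- B replaces A's nested re-scan of the suffix from each occupied index with one
-- linear pass over the room maintaining a boolean 'started' flag (simpler).

-- ===== PORT A =====
-- inner loop: 'for j in range(i, len(room)): if room[j] != type: return False'
def pvInnerA (room : List String) (type : String) : List Int → Bool
  | [] => true
  | j :: js => if PySem.List.pyGetD room j "" != type then false else pvInnerA room type js

-- outer loop over enumerate(room): skip '.', otherwise run the inner scan
def pvOuterA (room : List String) (type : String) : List (Int × String) → Bool
  | [] => true
  | (i, space) :: rest =>
      if space == "." then pvOuterA room type rest
      else if pvInnerA room type (PySem.List.pyRange i (room.length : Int) 1) = false then false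
      else pvOuterA room type rest

def can_accept_amphipod (room : List String) (type : String) : Bool :=
  pvOuterA room type (PySem.List.enumerate room 0)

-- ===== PORT B =====
-- one pass with a 'started' accumulator
def pvGoB (type : String) : List String → Bool → Bool
  | [], _ => true
  | space :: rest, started =>
      let started := started || space != "."
      if started && space != type then false else pvGoB type rest started

def can_accept_amphipod_alt (room : List String) (type : String) : Bool :=
  pvGoB type room false

-- ===== PRECONDITION & SPEC =====
def Spec_can_accept_amphipod (room : List String) (type : String) (out : Bool) : Prop := out = can_accept_amphipod_alt room type
instance (room : List String) (type : String) (out : Bool) : Decidable (Spec_can_accept_amphipod room type out) := by unfold Spec_can_accept_amphipod; infer_instance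

-- ===== CLAIM (what is proved, stated in full; the proofs are below) =====
def Claim_equal_can_accept_amphipod : Prop := ∀ (room : List String) (type : String), Dom_can_accept_amphipod room type → Spec_can_accept_amphipod room type (can_accept_amphipod room type)

-- ===== LEMMAS AND PROOFS =====

-- reference form both ports are reduced to: skip leading dots, then the whole suffix must equal type
def pvRef (type : String) : List String → Bool
  | [] => true
  | s :: rest => if s == "." then pvRef type rest else (s :: rest).all (· == type)

theorem pvInnerA_eq_all (room : List String) (type : String) (js : List Int) :
    pvInnerA room type js = (js.map (fun j => PySem.List.pyGetD room j "")).all (· == type) := by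
  induction js with
  | nil => rfl
  | cons j js ih =>
    simp only [pvInnerA, List.map_cons, List.all_cons, ih, bne]
    by_cases h : PySem.List.pyGetD room j "" == type <;> simp [h]

theorem pvInnerA_range (room : List String) (type : String) (i : Int) (hi : 0 ≤ i) :
    pvInnerA room type (PySem.List.pyRange i (room.length : Int) 1)
      = (room.drop i.toNat).all (· == type) := by
  rw [pvInnerA_eq_all, PySem.List.map_pyGetD_pyRange' room "" hi]

theorem pvRef_of_all (type : String) (l : List String) (h : l.all (· == type) = true) :
    pvRef type l = true := by
  induction l with
  | nil => rfl
  | cons s rest ih =>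
    simp only [List.all_cons, Bool.and_eq_true] at h
    simp only [pvRef]
    by_cases hs : s == "."
    · simp [hs, ih h.2]
    · simp [hs, h.1, h.2]

theorem pvOuterA_ref (type : String) (suf pre : List String) :
    pvOuterA (pre ++ suf) type (PySem.List.enumerate suf (pre.length : Int)) = pvRef type suf := by
  induction suf generalizing pre with
  | nil => rfl
  | cons s rest ih =>
    rw [PySem.List.enumerate_cons]
    have hdrop : (pre ++ s :: rest).drop ((pre.length : Int)).toNat = s :: rest := by
      simp
    have hrec : pvOuterA (pre ++ s :: rest) type
        (PySem.List.enumerate rest ((pre.length : Int) + 1)) = pvRef type rest := by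
      have := ih (pre ++ [s])
      simpa [List.append_assoc, add_comm] using this
    simp only [pvOuterA, pvRef]
    by_cases hs : s == "."
    · simp [hs, hrec]
    · rw [if_neg hs, if_neg hs]
      rw [pvInnerA_range _ _ _ (by positivity), hdrop]
      by_cases hall : (s :: rest).all (· == type) = true
      · have hrest : rest.all (· == type) = true := by
          simp only [List.all_cons, Bool.and_eq_true] at hall; exact hall.2
        rw [if_neg (by simp [hall]), hrec, hall, pvRef_of_all type rest hrest]
      · simp only [Bool.not_eq_true] at hall
        rw [if_pos hall, hall]

theorem pvGoB_ref (type : String) (l : List String) (started : Bool) :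
    pvGoB type l started = if started then l.all (· == type) else pvRef type l := by
  induction l generalizing started with
  | nil => cases started <;> rfl
  | cons s rest ih =>
    simp only [pvGoB, ih, pvRef, List.all_cons, bne]
    cases started with
    | true =>
      by_cases h : s == type <;> simp [h]
    | false =>
      by_cases hs : s == "."
      · simp [hs]
      · by_cases h : s == type <;> simp [hs, h]

-- ===== VERDICT (by name: the statement is the Claim_ definition above) =====
theorem can_accept_amphipod_spec : Claim_equal_can_accept_amphipod := by
  intro room type _
  show can_accept_amphipod room type = can_accept_amphipod_alt room type
  rw [can_accept_amphipod, can_accept_amphipod_alt, pvGoB_ref]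
  have := pvOuterA_ref type room []
  simpa using this
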